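-- pv_equiv track=rewrite | github.com/tizzhh/practicum_py | sprint15/8.py | correct_merge
-- ===== SOURCE A (Python) =====
-- def correct_merge(arr: list[int]) -> bool:
--     if len(arr) == 1 or not arr:
--         return True
--     arr = sorted(arr)
--     prev = arr[0]
--     for i in range(1, len(arr)):
--         if arr[i] - prev > 1:
--             return False
--         prev = arr[i]
--     return True
-- ===== SOURCE B (Python) =====
-- def correct_merge(arr: list[int]) -> bool:
--     if not arr:
--         return True
--     return max(arr) - min(arr) + 1 == len(set(arr))
-- ===== Notes on version B (the rewrite author's own statement) =====
-- stated objective: alternative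
-- what changed: Replaces sort-then-scan-adjacent-gaps with a set-cardinality check: the values form a gap-free run iff max-min+1 equals the number of distinct elements, so B builds a set and compares counts instead of sorting.
import Mathlib
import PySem

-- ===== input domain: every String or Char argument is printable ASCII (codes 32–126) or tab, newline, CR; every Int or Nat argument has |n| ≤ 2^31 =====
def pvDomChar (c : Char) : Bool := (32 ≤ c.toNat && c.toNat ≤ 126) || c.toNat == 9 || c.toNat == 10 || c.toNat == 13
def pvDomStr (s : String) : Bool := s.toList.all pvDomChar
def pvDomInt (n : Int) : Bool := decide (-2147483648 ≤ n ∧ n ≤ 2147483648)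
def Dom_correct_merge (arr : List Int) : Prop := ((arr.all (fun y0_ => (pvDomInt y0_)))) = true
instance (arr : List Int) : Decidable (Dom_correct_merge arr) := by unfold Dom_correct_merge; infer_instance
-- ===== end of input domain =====

-- B replaces A's sort-then-scan-adjacent-gaps with a set-cardinality check (max-min+1 = number of distinct values); alternative algorithm, same result.

-- ===== PORT A =====
-- A: guard len==1/empty, sort, then scan indices 1..len-1 comparing each element to the previous one;
-- the early 'return False' is carried as a Bool flag in the fold state (flag, prev).
def correct_merge (arr : List Int) : Bool :=
  if arr.length = 1 ∨ arr = [] then true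
  else
    ((PySem.List.pyRange 1 ((PySem.List.sorted arr (fun x => x) false).length : Int) 1).foldl
      (fun (st : Bool × Int) i =>
        if PySem.List.pyGetD (PySem.List.sorted arr (fun x => x) false) i 0 - st.2 > 1
        then (false, PySem.List.pyGetD (PySem.List.sorted arr (fun x => x) false) i 0)
        else (st.1, PySem.List.pyGetD (PySem.List.sorted arr (fun x => x) false) i 0))
      (true, PySem.List.pyGetD (PySem.List.sorted arr (fun x => x) false) 0 0)).1

-- ===== PORT B =====
-- B: empty guard, then max(arr) - min(arr) + 1 == len(set(arr));
-- max/min with no key are the running max/min folds (PySem.List.max?_id_cons / min?_id_cons).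
def correct_merge_alt (arr : List Int) : Bool :=
  match arr with
  | [] => true
  | x :: t =>
      decide (t.foldl max x - t.foldl min x + 1 = ((PySem.Set.ofList (x :: t)).length : Int))

-- ===== PRECONDITION & SPEC =====
def Spec_correct_merge (arr : List Int) (out : Bool) : Prop := out = correct_merge_alt arr
instance (arr : List Int) (out : Bool) : Decidable (Spec_correct_merge arr out) := by unfold Spec_correct_merge; infer_instance

-- ===== CLAIM (what is proved, stated in full; the proofs are below) =====
def Claim_equal_correct_merge : Prop := ∀ (arr : List Int), Dom_correct_merge arr → Spec_correct_merge arr (correct_merge arr)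

-- ===== LEMMAS AND PROOFS =====

-- A's scan of the sorted tail, as structural recursion: all consecutive gaps ≤ 1.
def gapOK : Int → List Int → Bool
  | _, [] => true
  | p, x :: t => (decide (x - p ≤ 1)) && gapOK x t

theorem foldl_step_fst (l : List Int) (ok : Bool) (p : Int) :
    (l.foldl (fun (st : Bool × Int) x => if x - st.2 > 1 then (false, x) else (st.1, x)) (ok, p)).1
      = (ok && gapOK p l) := by
  induction l generalizing ok p with
  | nil => simp [gapOK]
  | cons x t ih =>
      by_cases h : x - p > 1
      · simp [gapOK, h, ih, show ¬ (x - p ≤ 1) by omega]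
      · simp [gapOK, h, ih, show x - p ≤ 1 by omega]

theorem le_getLast_of_pairwise :
    ∀ (l : List Int) (hne : l ≠ []), l.Pairwise (· ≤ ·) → ∀ y ∈ l, y ≤ l.getLast hne := by
  intro l
  induction l with
  | nil => intro h; exact absurd rfl h
  | cons a t ih =>
      intro _ hp y hy
      cases t with
      | nil => simp_all
      | cons b t' =>
          rw [List.getLast_cons (by simp)]
          rcases List.mem_cons.mp hy with rfl | hy'
          · exact le_trans (List.rel_of_pairwise_cons hp (by simp))
              (ih (by simp) hp.tail b (by simp))
          · exact ih (by simp) hp.tail y hy'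

-- the gap scan succeeds iff every integer between the head and the last element occurs in the list
theorem gapOK_iff_interval :
    ∀ (t : List Int) (h : Int), (h :: t).Pairwise (· ≤ ·) →
      (gapOK h t = true ↔
        ∀ v : Int, h ≤ v → v ≤ (h :: t).getLast (by simp) → v ∈ h :: t) := by
  intro t
  induction t with
  | nil =>
      intro h _
      simp only [gapOK, List.getLast_singleton]
      constructor
      · intro _ v h1 h2
        have : v = h := le_antisymm h2 h1
        simp [this]
      · intro _; trivial
  | cons b t' ih =>
      intro h hp
      have hlast : (h :: b :: t').getLast (by simp) = (b :: t').getLast (by simp) :=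
        List.getLast_cons (by simp)
      have hbt : (b :: t').Pairwise (· ≤ ·) := hp.tail
      have hble : ∀ y ∈ b :: t', b ≤ y := by
        intro y hy
        rcases List.mem_cons.mp hy with rfl | hy'
        · exact le_refl _
        · exact List.rel_of_pairwise_cons hbt hy'
      constructor
      · intro hg v hv1 hv2
        simp only [gapOK, Bool.and_eq_true, decide_eq_true_eq] at hg
        rcases eq_or_lt_of_le hv1 with rfl | hlt
        · simp
        · have hvb : b ≤ v := by omega
          have := (ih b hbt).mp hg.2 v hvb (by rwa [hlast] at hv2)
          exact List.mem_cons_of_mem _ this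
      · intro hint
        simp only [gapOK, Bool.and_eq_true, decide_eq_true_eq]
        have hblast : b ≤ (b :: t').getLast (by simp) :=
          le_getLast_of_pairwise _ (by simp) hbt b (by simp)
        constructor
        · by_contra hgap
          have hmem : (h + 1) ∈ h :: b :: t' := by
            apply hint (h + 1) (by omega)
            rw [hlast]; omega
          rcases List.mem_cons.mp hmem with heq | hmem'
          · omega
          · have := hble _ hmem'; omega
        · apply (ih b hbt).mpr
          intro v hv1 hv2
          have hhb : h ≤ b := List.rel_of_pairwise_cons hp (by simp)
          have hmem : v ∈ h :: b :: t' := by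
            apply hint v (by omega)
            rw [hlast]; exact hv2
          rcases List.mem_cons.mp hmem with rfl | hmem'
          · have : v = b := by omega
            simp [this]
          · exact hmem'

-- B's count test, characterised as the same interval property (m = running min, M = running max)
theorem card_iff_interval (x : Int) (t : List Int) :
    ((t.foldl max x - t.foldl min x + 1 = ((PySem.Set.ofList (x :: t)).length : Int)) ↔
      ∀ v : Int, t.foldl min x ≤ v → v ≤ t.foldl max x → v ∈ x :: t) := by
  set m := t.foldl min x with hm
  set M := t.foldl max x with hM
  have hmx : m ≤ x := (PySem.List.foldl_min_le t x).1
  have hxM : x ≤ M := (PySem.List.le_foldl_max t x).1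
  have hbound : ∀ y ∈ x :: t, m ≤ y ∧ y ≤ M := by
    intro y hy
    rcases List.mem_cons.mp hy with rfl | hy'
    · exact ⟨hmx, hxM⟩
    · exact ⟨(PySem.List.foldl_min_le t x).2 y hy', (PySem.List.le_foldl_max t x).2 y hy'⟩
  have hlen : ((PySem.Set.ofList (x :: t)).length : Int) = ((x :: t).toFinset.card : Int) := by
    have hnd := PySem.Set.nodup_ofList (α := Int) (x :: t)
    have : (PySem.Set.ofList (x :: t)).toFinset = (x :: t).toFinset := by
      ext y; simp [PySem.Set.mem_ofList]
    rw [← this, List.toFinset_card_of_nodup hnd]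
  have hsub : (x :: t).toFinset ⊆ Finset.Icc m M := by
    intro y hy
    rw [List.mem_toFinset] at hy
    rw [Finset.mem_Icc]
    exact hbound y hy
  have hcard : ((Finset.Icc m M).card : Int) = M - m + 1 := by
    rw [Int.card_Icc]; omega
  constructor
  · intro heq v hv1 hv2
    have hle : (Finset.Icc m M).card ≤ (x :: t).toFinset.card := by
      have : ((x :: t).toFinset.card : Int) = ((Finset.Icc m M).card : Int) := by
        rw [hcard, ← hlen, heq]
      omega
    have hEq := Finset.eq_of_subset_of_card_le hsub hle
    have : v ∈ (x :: t).toFinset := by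
      rw [hEq, Finset.mem_Icc]; exact ⟨hv1, hv2⟩
    rwa [List.mem_toFinset] at this
  · intro hint
    have hsup : Finset.Icc m M ⊆ (x :: t).toFinset := by
      intro v hv
      rw [Finset.mem_Icc] at hv
      rw [List.mem_toFinset]
      exact hint v hv.1 hv.2
    have : (x :: t).toFinset = Finset.Icc m M := Finset.Subset.antisymm hsub hsup
    rw [hlen, this, hcard]

-- ===== VERDICT (by name: the statement is the Claim_ definition above) =====
theorem correct_merge_spec : Claim_equal_correct_merge := by
  intro arr _
  unfold Spec_correct_merge
  match harr : arr with
  | [] => rfl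
  | [x] =>
      simp [correct_merge, correct_merge_alt, PySem.Set.ofList, PySem.Set.add]
  | x :: y :: r =>
      have hne2 : ¬ ((x :: y :: r).length = 1 ∨ x :: y :: r = ([] : List Int)) := by simp
      rw [correct_merge, if_neg hne2]
      -- name the sorted list and split it
      set sa := PySem.List.sorted (x :: y :: r) (fun z => z) false with hsa
      have hsane : sa ≠ [] := by
        rw [hsa, Ne, PySem.List.sorted_eq_nil_iff]; simp
      obtain ⟨sh, st, hcons⟩ := List.exists_cons_of_ne_nil hsane
      -- A's fold = gapOK sh st
      rw [PySem.List.foldl_pyRange_pyGetD' sa 0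
        (fun (st : Bool × Int) x => if x - st.2 > 1 then (false, x) else (st.1, x))
        (true, PySem.List.pyGetD sa 0 0) (a := 1) (by norm_num)]
      rw [hcons]
      simp only [PySem.List.pyGetD_zero_cons, Int.toNat_one, List.drop_succ_cons, List.drop_zero]
      rw [foldl_step_fst, Bool.true_and]
      -- B's side
      show gapOK sh st = correct_merge_alt (x :: y :: r)
      rw [correct_merge_alt]
      -- identify min/max with head/getLast of the sorted list
      have hpw : (sh :: st).Pairwise (· ≤ ·) := by
        have := PySem.List.sorted_pairwise (x :: y :: r) (fun z => z)
        rw [← hsa, hcons] at this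
        exact this
      have hmemiff : ∀ v : Int, v ∈ sh :: st ↔ v ∈ x :: y :: r := by
        intro v
        rw [← hcons, hsa]
        exact PySem.List.mem_sorted _ _ _ v
      set m := (y :: r).foldl min x with hm
      set M := (y :: r).foldl max x with hM
      have hmmem : m ∈ x :: y :: r := by
        rcases PySem.List.foldl_min_mem (y :: r) x with h | h
        · rw [hm, h]; simp
        · rw [hm]; exact List.mem_cons_of_mem _ h
      have hMmem : M ∈ x :: y :: r := by
        rcases PySem.List.foldl_max_mem (y :: r) x with h | h
        · rw [hM, h]; simp
        · rw [hM]; exact List.mem_cons_of_mem _ h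
      have hmlo : ∀ v ∈ x :: y :: r, m ≤ v := by
        intro v hv
        rcases List.mem_cons.mp hv with rfl | hv'
        · exact (PySem.List.foldl_min_le (y :: r) v).1
        · exact (PySem.List.foldl_min_le (y :: r) x).2 v hv'
      have hMhi : ∀ v ∈ x :: y :: r, v ≤ M := by
        intro v hv
        rcases List.mem_cons.mp hv with rfl | hv'
        · exact (PySem.List.le_foldl_max (y :: r) v).1
        · exact (PySem.List.le_foldl_max (y :: r) x).2 v hv'
      have hshm : sh = m := by
        have h1 : sh ≤ m := by
          have := PySem.List.key_head_sorted_le (x :: y :: r) (fun z => z)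
            (m := sh) (t := st) (by rw [← hcons, hsa])
          exact this m hmmem
        have h2 : m ≤ sh := hmlo sh ((hmemiff sh).mp (by simp))
        omega
      have hlastM : (sh :: st).getLast (by simp) = M := by
        have h1 : (sh :: st).getLast (by simp) ≤ M :=
          hMhi _ ((hmemiff _).mp (List.getLast_mem _))
        have h2 : M ≤ (sh :: st).getLast (by simp) :=
          le_getLast_of_pairwise (sh :: st) (by simp) hpw M ((hmemiff M).mpr hMmem)
        omega
      -- chain the two characterisations
      have hA := gapOK_iff_interval st sh hpw
      have hB := card_iff_interval x (y :: r)
      rw [Bool.eq_iff_iff, hA, decide_eq_true_eq]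
      rw [← hm, ← hM] at hB
      rw [hB]
      constructor
      · intro hint v hv1 hv2
        exact (hmemiff v).mp (hint v (by omega) (by rw [hlastM]; exact hv2))
      · intro hint v hv1 hv2
        exact (hmemiff v).mpr (hint v (by omega) (by rw [← hlastM]; exact hv2))
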